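-- pv_equiv track=rewrite | github.com/HahmDY/PPO-soccer-player | Functions.py | sensor_front_sig
-- ===== SOURCE A (Python) =====
-- def sensor_front_sig(data):
--     player = []
--     sensor_data = []
--     for sensor in range(33):
--         player.append(data[8 * sensor:(8 * sensor) + 8])
--
--     for stack in range(3):
--         sensor_data.append(player[11 * stack:(11 * stack) + 11])
--
--     return sensor_data
-- ===== SOURCE B (Python) =====
-- def sensor_front_sig(data):
--     return [[data[8 * (11 * s + i):8 * (11 * s + i) + 8] for i in range(11)]
--             for s in range(3)]
-- ===== Notes on version B (the rewrite author's own statement) =====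
-- stated objective: simpler
-- what changed: B drops the intermediate flat 33-entry `player` table and its regrouping pass, building the 3x11 result directly with one nested comprehension over the combined index 11*s+i.
import Mathlib
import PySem

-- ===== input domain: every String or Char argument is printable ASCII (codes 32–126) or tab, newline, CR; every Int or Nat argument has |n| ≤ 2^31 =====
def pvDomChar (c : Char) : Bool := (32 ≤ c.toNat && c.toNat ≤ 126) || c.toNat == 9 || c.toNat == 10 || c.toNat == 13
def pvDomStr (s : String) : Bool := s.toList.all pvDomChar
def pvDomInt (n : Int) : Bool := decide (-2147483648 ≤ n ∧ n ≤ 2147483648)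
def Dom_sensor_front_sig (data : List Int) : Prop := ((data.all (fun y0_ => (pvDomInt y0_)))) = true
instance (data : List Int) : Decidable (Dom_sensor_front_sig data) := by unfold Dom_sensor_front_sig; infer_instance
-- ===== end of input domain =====

-- B drops the intermediate flat 33-entry player table, building the 3x11 result
-- directly with one nested traversal over the combined index 11*s+i (simpler).


-- ===== PORT A =====
-- player = []; for sensor in range(33): player.append(data[8*sensor : 8*sensor+8])
-- sensor_data = []; for stack in range(3): sensor_data.append(player[11*stack : 11*stack+11])
def sensor_front_sig (data : List Int) : List (List (List Int)) :=
  let player : List (List Int) :=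
    (PySem.List.pyRange 0 33 1).foldl
      (fun acc sensor => acc ++ [PySem.List.slice data (some (8 * sensor)) (some (8 * sensor + 8))]) []
  let sensor_data : List (List (List Int)) :=
    (PySem.List.pyRange 0 3 1).foldl
      (fun acc stack => acc ++ [PySem.List.slice player (some (11 * stack)) (some (11 * stack + 11))]) []
  sensor_data

-- ===== PORT B =====
-- [[data[8*(11*s+i) : 8*(11*s+i)+8] for i in range(11)] for s in range(3)]
def sensor_front_sig_alt (data : List Int) : List (List (List Int)) :=
  (PySem.List.pyRange 0 3 1).map (fun s =>
    (PySem.List.pyRange 0 11 1).map (fun i =>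
      PySem.List.slice data (some (8 * (11 * s + i))) (some (8 * (11 * s + i) + 8))))

-- ===== PRECONDITION & SPEC =====
def Spec_sensor_front_sig (data : List Int) (out : List (List (List Int))) : Prop := out = sensor_front_sig_alt data
instance (data : List Int) (out : List (List (List Int))) : Decidable (Spec_sensor_front_sig data out) := by unfold Spec_sensor_front_sig; infer_instance

-- ===== CLAIM (what is proved, stated in full; the proofs are below) =====
def Claim_equal_sensor_front_sig : Prop := ∀ (data : List Int), Dom_sensor_front_sig data → Spec_sensor_front_sig data (sensor_front_sig data)

-- ===== LEMMAS AND PROOFS =====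
theorem pvRange33 : PySem.List.pyRange 0 33 1 =
    [0,1,2,3,4,5,6,7,8,9,10,11,12,13,14,15,16,17,18,19,20,21,22,23,24,25,26,27,28,29,30,31,32] := by decide
theorem pvRange11 : PySem.List.pyRange 0 11 1 = [0,1,2,3,4,5,6,7,8,9,10] := by decide
theorem pvRange3 : PySem.List.pyRange 0 3 1 = [0,1,2] := by decide

-- ===== VERDICT (by name: the statement is the Claim_ definition above) =====
theorem sensor_front_sig_spec : Claim_equal_sensor_front_sig := by
  intro data _
  unfold Spec_sensor_front_sig sensor_front_sig sensor_front_sig_alt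
  simp only [pvRange33, pvRange11, pvRange3, List.foldl, List.map]
  norm_num [PySem.List.slice_toNat]
  simp
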